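-- pv_equiv track=rewrite | github.com/raffael-marinho/inventory-report | inventory_report/reports/complete_report.py | __get_companies_products
-- ===== SOURCE A (Python) =====
-- def __get_companies_products(product_list):
--     companies = {}
--
--     for product in product_list:
--         company_name = product["nome_da_empresa"]
--         if company_name in companies:
--             companies[company_name] += 1
--         else:
--             companies[company_name] = 1
--
--     return companies
-- ===== SOURCE B (Python) =====
-- def __get_companies_products(product_list):
--     # Alternative decomposition: extract the company names once, then give each
--     # first-seen name its total occurrence count via list.count (no running tally).
--     names = [product["nome_da_empresa"] for product in product_list]
--     companies = {}
--     for name in names: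
--         if name not in companies:
--             companies[name] = names.count(name)
--     return companies
-- ===== Notes on version B (the rewrite author's own statement) =====
-- stated objective: alternative
-- what changed: Replaces the running hash tally (membership test + increment per item) by a two-phase scheme: extract the name list once, then assign each first-seen name its total list.count in one shot.
import Mathlib
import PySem

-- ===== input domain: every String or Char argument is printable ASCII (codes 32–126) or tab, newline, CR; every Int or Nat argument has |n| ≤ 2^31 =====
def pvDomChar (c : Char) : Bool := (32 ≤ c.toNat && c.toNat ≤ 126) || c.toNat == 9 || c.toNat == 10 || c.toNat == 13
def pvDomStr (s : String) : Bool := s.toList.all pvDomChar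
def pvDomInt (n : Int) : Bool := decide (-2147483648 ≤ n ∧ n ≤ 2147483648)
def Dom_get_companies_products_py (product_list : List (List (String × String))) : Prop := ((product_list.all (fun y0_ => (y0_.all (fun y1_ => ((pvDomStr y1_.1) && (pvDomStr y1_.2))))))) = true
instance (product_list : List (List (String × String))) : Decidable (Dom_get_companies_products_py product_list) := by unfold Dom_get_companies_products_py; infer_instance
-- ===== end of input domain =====

-- B re-derives each company's count with list.count over the extracted name list instead of A's
-- running dict tally; return values (and key order) agree, equivalence proved below.

-- ===== PORT A =====
def get_companies_products_py (product_list : List (List (String × String))) : List (String × Int) :=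
  (product_list.foldl
    (fun (companies : PySem.Dict String Int) product =>
      let company_name := (PySem.Dict.mk product).getD "nome_da_empresa" ""
      if companies.contains company_name then
        companies.insert company_name (companies.getD company_name 0 + 1)
      else
        companies.insert company_name 1)
    PySem.Dict.empty).items

-- ===== PORT B =====
def get_companies_products_py_alt (product_list : List (List (String × String))) : List (String × Int) :=
  let names := product_list.map (fun product => (PySem.Dict.mk product).getD "nome_da_empresa" "")
  (names.foldl
    (fun (companies : PySem.Dict String Int) name =>
      if companies.contains name = false then
        companies.insert name ((PySem.List.count names name : Nat) : Int)
      else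
        companies)
    PySem.Dict.empty).items

-- ===== PRECONDITION & SPEC =====
-- Pre_ excludes exactly the inputs where some product lacks the key "nome_da_empresa",
-- on which the Python A (and B alike) raises KeyError.
def Pre_get_companies_products_py (product_list : List (List (String × String))) : Prop :=
  (product_list.all (fun product => product.any (fun p => p.1 == "nome_da_empresa"))) = true
instance (product_list : List (List (String × String))) : Decidable (Pre_get_companies_products_py product_list) := by unfold Pre_get_companies_products_py; infer_instance
def pvWitness_get_companies_products_py : (List (List (String × String))) :=
  [[("nome_da_empresa", "Acme"), ("nome_do_produto", "anvil")], [("nome_da_empresa", "Acme")]]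

def Spec_get_companies_products_py (product_list : List (List (String × String))) (out : List (String × Int)) : Prop := out = get_companies_products_py_alt product_list
instance (product_list : List (List (String × String))) (out : List (String × Int)) : Decidable (Spec_get_companies_products_py product_list out) := by unfold Spec_get_companies_products_py; infer_instance

-- ===== CLAIM (what is proved, stated in full; the proofs are below) =====
def Claim_equal_get_companies_products_py : Prop := ∀ (product_list : List (List (String × String))), Dom_get_companies_products_py product_list → Pre_get_companies_products_py product_list → Spec_get_companies_products_py product_list (get_companies_products_py product_list)

-- ===== LEMMAS AND PROOFS =====

-- A's loop is the canonical counter loop over the extracted names.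
theorem A_items (product_list : List (List (String × String))) :
    get_companies_products_py product_list =
      (PySem.Set.ofList (product_list.map (fun product => (PySem.Dict.mk product).getD "nome_da_empresa" ""))).map
        (fun k => (k, (List.count k (product_list.map (fun product => (PySem.Dict.mk product).getD "nome_da_empresa" "")) : Int))) := by
  unfold get_companies_products_py
  rw [show (fun (companies : PySem.Dict String Int) product =>
      let company_name := (PySem.Dict.mk product).getD "nome_da_empresa" ""
      if companies.contains company_name then
        companies.insert company_name (companies.getD company_name 0 + 1)
      else
        companies.insert company_name 1)
    = (fun (companies : PySem.Dict String Int) product =>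
        (fun d x => PySem.Dict.insert d x (PySem.Dict.getD d x 0 + 1)) companies
          ((PySem.Dict.mk product).getD "nome_da_empresa" "")) from by
      funext d p
      by_cases h : d.contains ((PySem.Dict.mk p).getD "nome_da_empresa" "")
      · simp [h]
      · rw [if_neg h]
        beta_reduce
        simp only [Bool.not_eq_true] at h
        rw [PySem.Dict.getD_of_not_contains _ _ h]
        norm_num]
  rw [← List.foldl_map (f := fun product => (PySem.Dict.mk product).getD "nome_da_empresa" "")
    (g := fun (d : PySem.Dict String Int) x => d.insert x (d.getD x 0 + 1))]
  rw [PySem.Dict.foldl_insert_getD_add_one_eq_counter]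
  exact PySem.Dict.items_counter _

-- B's loop invariant: folding over l extends the (name, total-count) table exactly by the
-- first occurrences that l adds to the set s.
theorem B_inv (full : List String) (l : List String) : ∀ (s : PySem.Set String),
    (l.foldl
      (fun (d : PySem.Dict String Int) name =>
        if d.contains name = false then
          d.insert name ((PySem.List.count full name : Nat) : Int)
        else d)
      (PySem.Dict.mk (s.map (fun k => (k, (List.count k full : Int))))))
    = PySem.Dict.mk ((l.foldl PySem.Set.add s).map (fun k => (k, (List.count k full : Int)))) := by
  induction l with
  | nil => intro s; rfl
  | cons a t ih =>
    intro s
    simp only [List.foldl_cons]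
    have hc : (PySem.Dict.mk (s.map (fun k => (k, (List.count k full : Int))))).contains a
        = PySem.Set.contains s a := by
      simp [PySem.Dict.contains, List.any_map, PySem.Set.contains, Function.comp_def,
        List.any_beq']
    by_cases h : PySem.Set.contains s a
    · rw [show PySem.Set.add s a = s from by unfold PySem.Set.add; rw [if_pos h],
        if_neg (by rw [hc, h]; simp)]
      exact ih s
    · have h' : PySem.Set.contains s a = false := by simpa using h
      rw [show PySem.Set.add s a = s ++ [a] from by unfold PySem.Set.add; rw [if_neg (by rw [h']; simp)],
        if_pos (by rw [hc, h']),
        show (PySem.Dict.mk (s.map (fun k => (k, (List.count k full : Int))))).insert a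
            ((PySem.List.count full a : Nat) : Int)
          = PySem.Dict.mk ((s ++ [a]).map (fun k => (k, (List.count k full : Int)))) from by
        unfold PySem.Dict.insert
        rw [if_neg (by rw [hc, h']; simp)]
        simp [PySem.List.count_eq]]
      exact ih (s ++ [a])

theorem B_items (product_list : List (List (String × String))) :
    get_companies_products_py_alt product_list =
      (PySem.Set.ofList (product_list.map (fun product => (PySem.Dict.mk product).getD "nome_da_empresa" ""))).map
        (fun k => (k, (List.count k (product_list.map (fun product => (PySem.Dict.mk product).getD "nome_da_empresa" "")) : Int))) := by
  have h0 : get_companies_products_py_alt product_list =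
      ((product_list.map (fun product => (PySem.Dict.mk product).getD "nome_da_empresa" "")).foldl
        (fun (companies : PySem.Dict String Int) name =>
          if companies.contains name = false then
            companies.insert name ((PySem.List.count
              (product_list.map (fun product => (PySem.Dict.mk product).getD "nome_da_empresa" "")) name : Nat) : Int)
          else companies)
        (PySem.Dict.mk (([] : PySem.Set String).map (fun k => (k, (List.count k
          (product_list.map (fun product => (PySem.Dict.mk product).getD "nome_da_empresa" "")) : Int)))))).items := rfl
  rw [h0, B_inv]
  rfl

-- ===== VERDICT (by name: the statement is the Claim_ definition above) =====
theorem get_companies_products_py_spec : Claim_equal_get_companies_products_py := by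
  intro product_list _ _
  unfold Spec_get_companies_products_py
  rw [A_items, B_items]
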